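-- pv_equiv track=rewrite | github.com/TheOneTrueNiz/Versatile_Embedded_Reasoning_Agent | src/learning/learning_loop_manager.py | _sanitize_tool_chain
-- ===== SOURCE A (Python) =====
-- from typing import Any, Dict, List, Optional, Tuple
--
-- def _sanitize_tool_chain(tools_used: List[str]) -> List[str]:
--     chain: List[str] = []
--     last = None
--     for name in tools_used:
--         if not isinstance(name, str) or not name:
--             continue
--         if name == last:
--             continue
--         chain.append(name)
--         last = name
--     return chain
-- ===== SOURCE B (Python) =====
-- from typing import List
--
-- def _sanitize_tool_chain(tools_used: List[str]) -> List[str]: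
--     f = [t for t in tools_used if isinstance(t, str) and t]
--     return f[:1] + [b for a, b in zip(f, f[1:]) if b != a]
-- ===== Notes on version B (the rewrite author's own statement) =====
-- stated objective: alternative
-- what changed: Replaced A's single stateful loop tracking a `last` variable with a stateless formulation: filter once, then compare the filtered list with its own one-step shift (zip(f, f[1:])), keeping the head plus every element that differs from its predecessor.
import Mathlib
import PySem

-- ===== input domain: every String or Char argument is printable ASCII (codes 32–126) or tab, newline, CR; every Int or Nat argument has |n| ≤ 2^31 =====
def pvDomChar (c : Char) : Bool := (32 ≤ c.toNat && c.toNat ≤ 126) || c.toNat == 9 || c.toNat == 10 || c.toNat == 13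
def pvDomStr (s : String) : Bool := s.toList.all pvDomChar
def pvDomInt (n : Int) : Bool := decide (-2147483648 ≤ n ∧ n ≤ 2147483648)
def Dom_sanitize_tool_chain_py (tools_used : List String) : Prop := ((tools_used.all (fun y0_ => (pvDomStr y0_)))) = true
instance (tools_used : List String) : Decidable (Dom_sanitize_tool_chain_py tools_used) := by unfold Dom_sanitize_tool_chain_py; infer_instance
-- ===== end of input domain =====

-- B replaces A's stateful last-seen loop by a stateless pairwise comparison of the filtered list with its own shift (same cost, different decomposition).

-- ===== PORT A =====
-- Python A: one loop over tools_used with state (chain, last); skips empty strings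
-- (isinstance(name, str) is always true at type List String) and names equal to `last`.
def sanitize_tool_chain_py (tools_used : List String) : List String :=
  (tools_used.foldl
    (fun (st : List String × Option String) name =>
      if name = "" then st
      else if some name = st.2 then st
      else (st.1 ++ [name], some name))
    ([], none)).1

-- ===== PORT B =====
-- f[:1] ++ [b for a, b in zip(f, f[1:]) if b != a]
def sanitize_tool_chain_py_alt (tools_used : List String) : List String :=
  let f := tools_used.filter (fun t => t != "")
  f.take 1 ++ ((f.zip (f.drop 1)).filter (fun p => p.2 != p.1)).map Prod.snd

-- ===== PRECONDITION & SPEC =====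
def Spec_sanitize_tool_chain_py (tools_used : List String) (out : List String) : Prop := out = sanitize_tool_chain_py_alt tools_used
instance (tools_used : List String) (out : List String) : Decidable (Spec_sanitize_tool_chain_py tools_used out) := by unfold Spec_sanitize_tool_chain_py; infer_instance

-- ===== CLAIM (what is proved, stated in full; the proofs are below) =====
def Claim_equal_sanitize_tool_chain_py : Prop := ∀ (tools_used : List String), Dom_sanitize_tool_chain_py tools_used → Spec_sanitize_tool_chain_py tools_used (sanitize_tool_chain_py tools_used)

-- ===== LEMMAS AND PROOFS =====

-- collapse-with-carry: A's loop on the already-filtered list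
def pvCollapse : Option String → List String → List String
  | _, [] => []
  | last, x :: xs => if some x = last then pvCollapse last xs else x :: pvCollapse (some x) xs

lemma pvFold_eq_collapse (l : List String) : ∀ (acc : List String) (last : Option String),
    (l.foldl
      (fun (st : List String × Option String) name =>
        if name = "" then st
        else if some name = st.2 then st
        else (st.1 ++ [name], some name))
      (acc, last)).1
    = acc ++ pvCollapse last (l.filter (fun t => t != "")) := by
  induction l with
  | nil => simp [pvCollapse]
  | cons x xs ih =>
    intro acc last
    simp only [List.foldl_cons, List.filter_cons]
    by_cases hx : x = ""
    · simp [hx, ih]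
    · by_cases hl : some x = last
      · simp [hx, hl, pvCollapse, ih]
      · simp [hx, hl, pvCollapse, ih]

lemma pvCollapse_some_eq_pairs (xs : List String) : ∀ (x : String),
    pvCollapse (some x) xs
      = (((x :: xs).zip xs).filter (fun p => p.2 != p.1)).map Prod.snd := by
  induction xs with
  | nil => intro x; simp [pvCollapse]
  | cons y ys ih =>
    intro x
    by_cases h : y = x
    · have h' : some y = some x := by simp [h]
      simp only [pvCollapse, h', List.zip_cons_cons, List.filter_cons]
      simp [h, ih]
    · have h' : ¬ (some y = some x) := by simp [h]
      simp only [pvCollapse, List.zip_cons_cons, List.filter_cons]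
      simp [h, h', ih]

lemma pvCollapse_none_eq_alt (f : List String) :
    pvCollapse none f
      = f.take 1 ++ ((f.zip (f.drop 1)).filter (fun p => p.2 != p.1)).map Prod.snd := by
  cases f with
  | nil => simp [pvCollapse]
  | cons x xs => simp [pvCollapse, pvCollapse_some_eq_pairs]

-- ===== VERDICT (by name: the statement is the Claim_ definition above) =====
theorem sanitize_tool_chain_py_spec : Claim_equal_sanitize_tool_chain_py := by
  intro tools_used _
  show _ = _
  unfold sanitize_tool_chain_py sanitize_tool_chain_py_alt
  rw [pvFold_eq_collapse, pvCollapse_none_eq_alt]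
  simp
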